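-- pv_equiv track=rewrite | github.com/milu234/Ecommerce | templates/HTML/consolation.py | numofPrizes
-- ===== SOURCE A (Python) =====
-- def numofPrizes(k, marks):
--     a={}
--     rank=1
--     marks = list(filter(lambda b: b != 0, marks))
--     for num in sorted(marks, reverse = True):
--         if num not in a:
--             a[num]=rank
--             rank=rank+1
--     ranks = [a[i] for i in sorted(marks, reverse = True)]
--     finalKey = -1
--     for key,val in a.items():
--         if val == k:
--             finalKey = key
--     count = 0
--     for x in marks:
--         if x>= finalKey:
--             count+=1
--     return count
-- ===== SOURCE B (Python) =====
-- def numofPrizes(k, marks):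
--     nz = [x for x in marks if x != 0]
--     vals = list(set(nz))
--     # binary search on the answer: target = largest t with at least k distinct values >= t,
--     # i.e. the k-th largest distinct nonzero mark; no sorting, no rank dictionary.
--     target = -1
--     if 1 <= k <= len(vals):
--         lo, hi = min(vals), max(vals)
--         while lo < hi:
--             mid = (lo + hi + 1) // 2
--             atleast = 0
--             for v in vals:
--                 if v >= mid:
--                     atleast += 1
--             if atleast >= k:
--                 lo = mid
--             else:
--                 hi = mid - 1
--         target = lo
--     count = 0
--     for x in nz:
--         if x >= target:
--             count += 1
--     return count
-- ===== Notes on version B (the rewrite author's own statement) =====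
-- stated objective: alternative
-- what changed: Instead of sorting the marks and building a value-to-rank dictionary whose items are scanned for the key of rank k, B deduplicates once and binary-searches on the answer value (the largest t with at least k distinct values >= t, each probe a linear counting pass), then counts marks >= t in one pass; no sort, no dict.
import Mathlib
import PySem

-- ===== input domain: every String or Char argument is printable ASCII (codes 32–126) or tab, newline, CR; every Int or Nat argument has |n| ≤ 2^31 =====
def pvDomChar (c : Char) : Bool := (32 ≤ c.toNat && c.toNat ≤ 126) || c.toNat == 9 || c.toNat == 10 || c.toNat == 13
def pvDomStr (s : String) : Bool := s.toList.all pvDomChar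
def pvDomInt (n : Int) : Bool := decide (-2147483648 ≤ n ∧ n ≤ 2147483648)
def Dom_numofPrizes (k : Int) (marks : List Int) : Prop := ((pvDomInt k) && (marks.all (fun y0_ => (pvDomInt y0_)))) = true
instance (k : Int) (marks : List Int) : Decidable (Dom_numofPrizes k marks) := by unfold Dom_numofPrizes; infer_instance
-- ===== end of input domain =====

-- B replaces A's double sort + rank dictionary + last-match scan by a binary search on the
-- answer value: the k-th largest distinct nonzero mark is the largest t with at least k
-- distinct values ≥ t; no sorting, no dictionary.

-- ===== PORT A =====
-- the dict-building loop body: if num not in a: a[num] = rank; rank += 1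
def numofPrizesStep (st : PySem.Dict Int Int × Int) (num : Int) : PySem.Dict Int Int × Int :=
  if st.1.contains num = false then (st.1.insert num st.2, st.2 + 1) else st

def numofPrizes (k : Int) (marks : List Int) : Int :=
  let marks := marks.filter (fun b => decide (b ≠ 0))
  let ar := (PySem.List.sorted marks (fun x => x) true).foldl numofPrizesStep (PySem.Dict.empty, 1)
  let a := ar.1
  -- ranks = [a[i] for i in sorted(marks, reverse=True)]  (unused by A; each key is present, so a[i] = getD i 0)
  let _ranks := (PySem.List.sorted marks (fun x => x) true).map (fun i => a.getD i 0)
  let finalKey := a.items.foldl (fun fk kv => if kv.2 = k then kv.1 else fk) (-1)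
  marks.foldl (fun count x => if x ≥ finalKey then count + 1 else count) 0

-- ===== PORT B =====
-- the inner 'for v in vals' counting loop of Source B
def countAtLeast (vals : List Int) (mid : Int) : Int :=
  vals.foldl (fun atleast v => if v ≥ mid then atleast + 1 else atleast) 0

-- the 'while lo < hi' binary-search loop of Source B (terminates because the interval shrinks)
def bsearch (vals : List Int) (k lo hi : Int) : Int :=
  if h : lo < hi then
    let mid := PySem.Int.floordiv (lo + hi + 1) 2
    if countAtLeast vals mid ≥ k then bsearch vals k mid hi
    else bsearch vals k lo (mid - 1)
  else lo
termination_by (hi - lo).toNat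
decreasing_by
  all_goals
    have hb := PySem.Int.floordiv_two_mid_bounds (show lo + 1 ≤ hi by omega)
    rw [show lo + 1 + hi = lo + hi + 1 by ring] at hb
    omega

def numofPrizes_alt (k : Int) (marks : List Int) : Int :=
  let nz := marks.filter (fun x => decide (x ≠ 0))
  let vals := PySem.Set.ofList nz
  -- min(vals)/max(vals) are only read when 1 ≤ k ≤ len(vals), so vals ≠ [] and getD never defaults
  let target :=
    if 1 ≤ k ∧ k ≤ (vals.length : Int) then
      bsearch vals k ((PySem.List.min? vals (fun x => x)).getD 0)
        ((PySem.List.max? vals (fun x => x)).getD 0)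
    else -1
  nz.foldl (fun count x => if x ≥ target then count + 1 else count) 0

-- ===== PRECONDITION & SPEC =====
def Spec_numofPrizes (k : Int) (marks : List Int) (out : Int) : Prop := out = numofPrizes_alt k marks
instance (k : Int) (marks : List Int) (out : Int) : Decidable (Spec_numofPrizes k marks out) := by unfold Spec_numofPrizes; infer_instance

-- ===== CLAIM (what is proved, stated in full; the proofs are below) =====
def Claim_equal_numofPrizes : Prop := ∀ (k : Int) (marks : List Int), Dom_numofPrizes k marks → Spec_numofPrizes k marks (numofPrizes k marks)

-- ===== LEMMAS AND PROOFS =====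

-- ---- A side: characterize the dict and the finalKey scan ----

-- items of A's dict after the loop: the deduped list paired with ranks r, r+1, …
def rankItems : List Int → Int → List (Int × Int)
  | [], _ => []
  | x :: xs, r => (x, r) :: rankItems xs (r + 1)

theorem rankItems_append (xs ys : List Int) (r : Int) :
    rankItems (xs ++ ys) r = rankItems xs r ++ rankItems ys (r + (xs.length : Int)) := by
  induction xs generalizing r with
  | nil => simp [rankItems]
  | cons x xs ih =>
    simp only [List.cons_append, rankItems, ih, List.length_cons]
    congr 2
    push_cast
    ring_nf

theorem rankItems_fst (xs : List Int) (r : Int) : (rankItems xs r).map (·.1) = xs := by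
  induction xs generalizing r with
  | nil => rfl
  | cons x xs ih => simp [rankItems, ih]

theorem ofList_sublist {α : Type} [BEq α] [LawfulBEq α] (xs : List α) :
    List.Sublist (PySem.Set.ofList xs) xs := by
  induction xs using List.reverseRecOn with
  | nil => simp [PySem.Set.ofList]
  | append_singleton xs x ih =>
    rw [PySem.Set.ofList_append_singleton, PySem.Set.add_eq_ite]
    split
    · exact ih.trans (List.sublist_append_left xs [x])
    · exact List.Sublist.append ih (List.Sublist.refl [x])

-- the invariant of A's dict loop
theorem dict_loop_inv (L : List Int) :
    (L.foldl numofPrizesStep (PySem.Dict.empty, 1)).1.items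
      = rankItems (PySem.Set.ofList L) 1 ∧
    (L.foldl numofPrizesStep (PySem.Dict.empty, 1)).2
      = ((PySem.Set.ofList L).length : Int) + 1 := by
  induction L using List.reverseRecOn with
  | nil => constructor <;> rfl
  | append_singleton L x ih =>
    obtain ⟨h1, h2⟩ := ih
    rw [List.foldl_append, List.foldl_cons, List.foldl_nil,
      PySem.Set.ofList_append_singleton, PySem.Set.add_eq_ite]
    set st := L.foldl numofPrizesStep (PySem.Dict.empty, 1) with hst
    have hkeys : st.1.keys = PySem.Set.ofList L := by
      have hk : st.1.keys = st.1.items.map (·.1) := rfl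
      rw [hk, h1, rankItems_fst]
    have hcont : st.1.contains x = true ↔ x ∈ PySem.Set.ofList L := by
      rw [PySem.Dict.contains_iff_mem_keys, hkeys]
    by_cases hx : x ∈ PySem.Set.ofList L
    · have hc : st.1.contains x = true := hcont.mpr hx
      have hstep : numofPrizesStep st x = st := by simp [numofPrizesStep, hc]
      rw [hstep, if_pos hx]
      exact ⟨h1, h2⟩
    · have hc : st.1.contains x = false := by
        cases hcc : st.1.contains x
        · rfl
        · exact absurd (hcont.mp hcc) hx
      have hstep : numofPrizesStep st x = (st.1.insert x st.2, st.2 + 1) := by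
        simp [numofPrizesStep, hc]
      rw [hstep, if_neg hx]
      refine ⟨?_, ?_⟩
      · rw [PySem.Dict.items_insert_of_not_contains _ _ hc, h1, h2, rankItems_append]
        simp [rankItems]
        ring_nf
      · show st.2 + 1 = _
        rw [h2]
        simp only [List.length_append, List.length_cons, List.length_nil]
        push_cast
        ring

-- the finalKey scan over rankItems D r picks D[k - r] when r ≤ k < r + |D|, else the init
theorem finalKey_scan (D : List Int) (r k init : Int) :
    (rankItems D r).foldl (fun fk kv => if kv.2 = k then kv.1 else fk) init
      = if r ≤ k ∧ k < r + (D.length : Int) then D.getD (k - r).toNat 0 else init := by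
  induction D generalizing r init with
  | nil =>
    simp only [rankItems, List.foldl_nil, List.length_nil, Nat.cast_zero, add_zero]
    rw [if_neg (by omega)]
  | cons d ds ih =>
    simp only [rankItems, List.foldl_cons, ih]
    have hL : (((d :: ds).length : Nat) : Int) = (ds.length : Int) + 1 := by simp
    by_cases hk : r = k
    · rw [if_neg (by omega), if_pos (by omega)]
      have h0 : (k - r).toNat = 0 := by omega
      simp [hk]
    · by_cases hr : r + 1 ≤ k ∧ k < r + 1 + (ds.length : Int)
      · rw [if_pos hr, if_pos (by omega)]
        have h1 : (k - r).toNat = (k - (r + 1)).toNat + 1 := by omega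
        simp [h1]
      · rw [if_neg hr, if_neg (by omega), if_neg (by omega)]

-- ---- B side: the counting loop is countP, and the binary search lands on D[k-1] ----

-- on a strictly descending list, the values ≥ its i-th element are exactly the first i+1
theorem filter_ge_of_sorted (D : List Int) (h : D.Pairwise (· > ·)) :
    ∀ (i : Nat) (c : Int), D[i]? = some c →
      D.filter (fun x => decide (c ≤ x)) = D.take (i + 1) := by
  induction D with
  | nil => intro i c hc; simp at hc
  | cons a t ih =>
    intro i c hc
    obtain ⟨ha, ht⟩ := List.pairwise_cons.mp h
    cases i with
    | zero =>
      rw [List.getElem?_cons_zero, Option.some_inj] at hc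
      subst hc
      rw [List.filter_cons, if_pos (by simp), List.take_succ_cons, List.take_zero]
      refine congrArg _ (List.filter_eq_nil_iff.mpr (fun x hx => by
        simp only [decide_eq_true_eq]
        have := ha x hx
        omega))
    | succ i =>
      rw [List.getElem?_cons_succ] at hc
      have hcmem : c ∈ t := List.mem_of_getElem? hc
      rw [List.filter_cons, if_pos (by simp; have := ha c hcmem; omega),
        List.take_succ_cons]
      exact congrArg _ (ih ht i c hc)

-- … and the values strictly above it are exactly the first i
theorem filter_gt_of_sorted (D : List Int) (h : D.Pairwise (· > ·)) :
    ∀ (i : Nat) (c : Int), D[i]? = some c →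
      D.filter (fun x => decide (c < x)) = D.take i := by
  induction D with
  | nil => intro i c hc; simp at hc
  | cons a t ih =>
    intro i c hc
    obtain ⟨ha, ht⟩ := List.pairwise_cons.mp h
    cases i with
    | zero =>
      rw [List.getElem?_cons_zero, Option.some_inj] at hc
      subst hc
      rw [List.filter_cons, if_neg (by simp), List.take_zero]
      exact List.filter_eq_nil_iff.mpr (fun x hx => by
        simp only [decide_eq_true_eq]
        have := ha x hx
        omega)
    | succ i =>
      rw [List.getElem?_cons_succ] at hc
      have hcmem : c ∈ t := List.mem_of_getElem? hc
      rw [List.filter_cons, if_pos (by simp; have := ha c hcmem; omega),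
        List.take_succ_cons]
      exact congrArg _ (ih ht i c hc)

theorem countAtLeast_eq (vals : List Int) (m : Int) :
    countAtLeast vals m = ((vals.countP (fun v => decide (m ≤ v)) : Nat) : Int) := by
  unfold countAtLeast
  rw [PySem.List.foldl_ite_add_one (fun v => m ≤ v)]
  simp

-- the binary search converges to the unique t with 'at least k values ≥ m exactly for m ≤ t'
theorem bsearch_eq (vals : List Int) (k t : Int)
    (hgood : ∀ m : Int, m ≤ t → k ≤ countAtLeast vals m)
    (hbad : ∀ m : Int, t < m → countAtLeast vals m < k) :
    ∀ (n : Nat) (lo hi : Int), (hi - lo).toNat ≤ n → lo ≤ t → t ≤ hi →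
      bsearch vals k lo hi = t := by
  intro n
  induction n with
  | zero =>
    intro lo hi hn hlo hhi
    rw [bsearch, dif_neg (show ¬ lo < hi by omega)]
    omega
  | succ n ihn =>
    intro lo hi hn hlo hhi
    rw [bsearch]
    by_cases h : lo < hi
    · rw [dif_pos h]
      have hb := PySem.Int.floordiv_two_mid_bounds (show lo + 1 ≤ hi by omega)
      rw [show lo + 1 + hi = lo + hi + 1 by ring] at hb
      show (if countAtLeast vals (PySem.Int.floordiv (lo + hi + 1) 2) ≥ k then
          bsearch vals k (PySem.Int.floordiv (lo + hi + 1) 2) hi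
        else bsearch vals k lo (PySem.Int.floordiv (lo + hi + 1) 2 - 1)) = t
      by_cases hc : countAtLeast vals (PySem.Int.floordiv (lo + hi + 1) 2) ≥ k
      · rw [if_pos hc]
        refine ihn _ _ (by omega) ?_ hhi
        by_contra hmt
        exact absurd hc (by simp only [not_le, ge_iff_le]; exact hbad _ (by omega))
      · rw [if_neg hc]
        refine ihn _ _ (by omega) hlo ?_
        by_contra hmt
        exact hc (hgood _ (by omega))
    · rw [dif_neg h]
      omega

-- the distinct values of the descending sort: strictly descending, same membership as nz
theorem distinct_sorted (nz : List Int) :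
    (PySem.Set.ofList (PySem.List.sorted nz (fun x => x) true)).Pairwise (· > ·) ∧
    (∀ x, x ∈ nz ↔ x ∈ PySem.Set.ofList (PySem.List.sorted nz (fun x => x) true)) := by
  constructor
  · have hsub := ofList_sublist (PySem.List.sorted nz (fun x => x) true)
    have hle : (PySem.Set.ofList (PySem.List.sorted nz (fun x => x) true)).Pairwise
        (fun a b => b ≤ a) :=
      (PySem.List.sorted_pairwise_rev nz (fun x => x)).sublist hsub
    have hne := (PySem.Set.nodup_ofList (PySem.List.sorted nz (fun x => x) true))
    exact (hle.and hne).imp (fun h => lt_of_le_of_ne h.1 (fun he => h.2 he.symm))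
  · intro x
    rw [PySem.Set.mem_ofList, PySem.List.mem_sorted]

-- ===== VERDICT (by name: the statement is the Claim_ definition above) =====
theorem numofPrizes_spec : Claim_equal_numofPrizes := by
  intro k marks _
  unfold Spec_numofPrizes numofPrizes numofPrizes_alt
  simp only []
  set nz := marks.filter (fun b => decide (b ≠ 0)) with hnz
  set S := PySem.List.sorted nz (fun x => x) true with hS
  obtain ⟨hsort, hmem⟩ := distinct_sorted nz
  rw [← hS] at hsort hmem
  obtain ⟨h1, _⟩ := dict_loop_inv S
  rw [h1, finalKey_scan]
  set vals := PySem.Set.ofList nz with hvals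
  set D := PySem.Set.ofList S with hD
  have hperm : vals.Perm D :=
    (List.perm_ext_iff_of_nodup (PySem.Set.nodup_ofList nz) (PySem.Set.nodup_ofList S)).mpr
      (fun a => by rw [PySem.Set.mem_ofList]; exact hmem a)
  have hlen : (vals.length : Int) = (D.length : Int) := by exact_mod_cast hperm.length_eq
  have hkey : (if 1 ≤ k ∧ k < 1 + (D.length : Int) then D.getD (k - 1).toNat 0 else -1)
      = (if 1 ≤ k ∧ k ≤ (vals.length : Int) then
          bsearch vals k ((PySem.List.min? vals (fun x => x)).getD 0)
            ((PySem.List.max? vals (fun x => x)).getD 0)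
        else -1) := by
    by_cases hk : 1 ≤ k ∧ k ≤ (vals.length : Int)
    · rw [if_pos (by omega), if_pos hk]
      have hklt : k.toNat - 1 < D.length := by omega
      set i := k.toNat - 1 with hi
      set t := D[i]'hklt with ht
      have hgetD : D.getD (k - 1).toNat 0 = t := by
        rw [show (k - 1).toNat = i by omega, List.getD_eq_getElem D 0 hklt]
      have hti : D[i]? = some t := List.getElem?_eq_getElem hklt
      have htD : t ∈ D := List.getElem_mem hklt
      have htv : t ∈ vals := hperm.mem_iff.mpr htD
      -- counts: at least k values ≥ m iff m ≤ t
      have hcnt : ∀ m : Int, countAtLeast vals m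
          = ((D.countP (fun v => decide (m ≤ v)) : Nat) : Int) := by
        intro m
        rw [countAtLeast_eq, hperm.countP_eq]
      have hcnt_t : D.countP (fun v => decide (t ≤ v)) = i + 1 := by
        rw [List.countP_eq_length_filter, filter_ge_of_sorted D hsort i t hti,
          List.length_take]
        omega
      have hcnt_gt : D.countP (fun v => decide (t < v)) = i := by
        rw [List.countP_eq_length_filter, filter_gt_of_sorted D hsort i t hti,
          List.length_take]
        omega
      have hgood : ∀ m : Int, m ≤ t → k ≤ countAtLeast vals m := by
        intro m hm
        rw [hcnt]
        have hmono : D.countP (fun v => decide (t ≤ v)) ≤ D.countP (fun v => decide (m ≤ v)) :=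
          List.countP_mono_left (fun x _ hx => by
            simp only [decide_eq_true_eq] at hx ⊢; omega)
        omega
      have hbad : ∀ m : Int, t < m → countAtLeast vals m < k := by
        intro m hm
        rw [hcnt]
        have hmono : D.countP (fun v => decide (m ≤ v)) ≤ D.countP (fun v => decide (t < v)) :=
          List.countP_mono_left (fun x _ hx => by
            simp only [decide_eq_true_eq] at hx ⊢; omega)
        omega
      -- the search interval [min(vals), max(vals)] contains t
      have hmn : ∃ mn, PySem.List.min? vals (fun x => x) = some mn := by
        cases hmn : PySem.List.min? vals (fun x => x) with
        | none =>
          rw [PySem.List.min?_eq_none_iff] at hmn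
          exact absurd (hmn ▸ htv) (List.not_mem_nil)
        | some mn => exact ⟨mn, rfl⟩
      obtain ⟨mn, hmn⟩ := hmn
      have hmx : ∃ mx, PySem.List.max? vals (fun x => x) = some mx := by
        cases hmx : PySem.List.max? vals (fun x => x) with
        | none =>
          rw [PySem.List.max?_eq_none_iff] at hmx
          exact absurd (hmx ▸ htv) (List.not_mem_nil)
        | some mx => exact ⟨mx, rfl⟩
      obtain ⟨mx, hmx⟩ := hmx
      rw [hmn, hmx, hgetD, Option.getD_some, Option.getD_some]
      exact (bsearch_eq vals k t hgood hbad ((mx - mn).toNat) mn mx (le_refl _)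
        (PySem.List.min?_isMin hmn t htv) (PySem.List.max?_isMax hmx t htv)).symm
    · rw [if_neg (by omega), if_neg hk]
  rw [hkey]
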